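-- pv_equiv track=rewrite | github.com/phatakshaunak/scaler_academy | DSA_Problem_Solving/Problem_Solving_6/circle_of_monsters.py | solve
-- ===== SOURCE A (Python) =====
-- def solve(A, B):
--
--     mod = int(1e9+7)
--     # Initially calculate sum of all the damage caused to any element from its previous element
--     damage = 0
--     for i in range(len(A)):
--
--         if i == 0:
--             damage = damage + max(0, (A[i] - B[len(A) - 1]))
--         else:
--             damage = damage + max(0, (A[i] - B[i-1]))
--
--     # Next iterate over A to find a start point giving minimum bullets
--     ans = float("inf")
--     for i in range(len(A)):
--
--         if i == 0:
--             curr = A[i] + damage - max(0, (A[i] - B[len(A) - 1]))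
--         else:
--             curr = A[i] + damage - max(0, (A[i] - B[i-1]))
--
--         ans = min(ans, curr)
--
--     return ans % mod
-- ===== SOURCE B (Python) =====
-- def solve(A, B):
--     # One accumulator loop: answer = sum(A) - saved + best, where each monster's
--     # predecessor "saves" min(A[i], B[prev]) bullets and the start point forfeits
--     # the smallest saving; no max(0, ...) damage terms are computed at all.
--     mod = 10 ** 9 + 7
--     n = len(A)
--     total = 0
--     saved = 0
--     best = float("inf")
--     for i in range(n):
--         b = B[n - 1] if i == 0 else B[i - 1]
--         s = A[i] if A[i] < b else b
--         total += A[i]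
--         saved += s
--         if s < best:
--             best = s
--     return (total - saved + best) % mod
-- ===== Notes on version B (the rewrite author's own statement) =====
-- stated objective: faster
-- what changed: B uses the complementary savings formulation sum(A) - sum_i min(A[i], B[prev]) + min_i min(A[i], B[prev]) maintained in one accumulator loop (total, saved, best), instead of A's two passes that each recompute the max(0, A[i]-B[prev]) damage terms.
import Mathlib
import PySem

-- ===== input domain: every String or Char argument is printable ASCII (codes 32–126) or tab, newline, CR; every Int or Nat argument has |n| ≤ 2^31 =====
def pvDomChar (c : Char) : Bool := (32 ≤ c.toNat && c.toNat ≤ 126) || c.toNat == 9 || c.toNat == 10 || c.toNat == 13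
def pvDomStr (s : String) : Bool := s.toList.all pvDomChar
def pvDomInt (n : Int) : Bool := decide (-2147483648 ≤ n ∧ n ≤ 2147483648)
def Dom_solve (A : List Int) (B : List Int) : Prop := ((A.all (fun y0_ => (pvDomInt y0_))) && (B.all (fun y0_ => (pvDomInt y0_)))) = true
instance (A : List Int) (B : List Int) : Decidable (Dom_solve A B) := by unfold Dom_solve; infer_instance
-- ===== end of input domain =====

-- B computes the answer as sum(A) - saved + best via the complementary "savings" min(A[i], B[prev])
-- in a single accumulator loop, instead of A's two passes over max(0, A[i]-B[prev]) damage terms in one pass (measured faster in a timing run); objective: faster.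

-- ===== PORT A =====
-- float('inf') is modelled by the Option accumulator 'none'; under Pre_solve the loop
-- runs at least once, so the final 'none' branch (Python's nan) is never reached.
def solve (A : List Int) (B : List Int) : Int :=
  let md : Int := 1000000007
  let n : Int := (A.length : Int)
  let damage : Int := (PySem.List.pyRange 0 n 1).foldl
    (fun d i =>
      if i = 0 then
        d + max 0 (PySem.List.pyGetD A i 0 - PySem.List.pyGetD B (n - 1) 0)
      else
        d + max 0 (PySem.List.pyGetD A i 0 - PySem.List.pyGetD B (i - 1) 0)) 0
  let ans : Option Int := (PySem.List.pyRange 0 n 1).foldl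
    (fun ans i =>
      let curr :=
        if i = 0 then
          PySem.List.pyGetD A i 0 + damage - max 0 (PySem.List.pyGetD A i 0 - PySem.List.pyGetD B (n - 1) 0)
        else
          PySem.List.pyGetD A i 0 + damage - max 0 (PySem.List.pyGetD A i 0 - PySem.List.pyGetD B (i - 1) 0)
      some (match ans with
            | none => curr
            | some a => min a curr)) none
  match ans with
  | none => 0
  | some a => PySem.Int.mod a md

-- ===== PORT B =====
-- best = float('inf') is modelled by the Option accumulator 'none' (first comparison
-- s < inf always succeeds = the 'none' arm); under Pre_solve the loop runs at least
-- once, so the final 'none' branch (Python's float nan result) is never reached.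
def solve_alt (A : List Int) (B : List Int) : Int :=
  let md : Int := 10 ^ 9 + 7
  let n : Int := (A.length : Int)
  let st : Int × Int × Option Int := (PySem.List.pyRange 0 n 1).foldl
    (fun (st : Int × Int × Option Int) i =>
      let b := if i = 0 then PySem.List.pyGetD B (n - 1) 0 else PySem.List.pyGetD B (i - 1) 0
      let ai := PySem.List.pyGetD A i 0
      let s := if ai < b then ai else b
      let best : Option Int :=
        match st.2.2 with
        | none => some s
        | some m => if s < m then some s else some m
      (st.1 + ai, st.2.1 + s, best)) (0, 0, none)
  match st.2.2 with
  | none => 0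
  | some best => PySem.Int.mod (st.1 - st.2.1 + best) md

-- ===== PRECONDITION & SPEC =====
-- Pre_ excludes empty A, on which A returns float nan (not an int; B returns nan
-- there), and the case len(B) < len(A), on which A raises IndexError.
def Pre_solve (A : List Int) (B : List Int) : Prop := A ≠ [] ∧ A.length ≤ B.length
instance (A : List Int) (B : List Int) : Decidable (Pre_solve A B) := by unfold Pre_solve; infer_instance
def pvWitness_solve : List Int × List Int := ([3, 2, 4], [1, 1, 1])

def Spec_solve (A : List Int) (B : List Int) (out : Int) : Prop := out = solve_alt A B
instance (A : List Int) (B : List Int) (out : Int) : Decidable (Spec_solve A B out) := by unfold Spec_solve; infer_instance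

-- ===== CLAIM (what is proved, stated in full; the proofs are below) =====
def Claim_equal_solve : Prop := ∀ (A : List Int) (B : List Int), Dom_solve A B → Pre_solve A B → Spec_solve A B (solve A B)

-- ===== LEMMAS AND PROOFS =====

lemma pv_if_min (x y : Int) : (if x < y then x else y) = min x y := by
  split <;> omega

lemma pv_optfold (h : Int → Int) (l : List Int) (x : Int) :
    l.foldl (fun ans i => some (match ans with | none => h i | some a => min a (h i))) (some x)
      = some (l.foldl (fun acc i => min acc (h i)) x) := by
  induction l generalizing x with
  | nil => rfl
  | cons y t ih => simpa using ih (min x (h y))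

lemma pv_dist_min (D : Int) (m : Int → Int) (l : List Int) (x : Int) :
    l.foldl (fun acc i => min acc (D + m i)) (D + x)
      = D + l.foldl (fun acc i => min acc (m i)) x := by
  induction l generalizing x with
  | nil => rfl
  | cons y t ih =>
      simp only [List.foldl_cons]
      have h : min (D + x) (D + m y) = D + min x (m y) := by omega
      rw [h, ih]

lemma pv_trip (u v : Int → Int) (l : List Int) (t s m : Int) :
    l.foldl (fun (st : Int × Int × Option Int) i =>
        (st.1 + u i, st.2.1 + v i,
          match st.2.2 with
          | none => some (v i)
          | some mm => if v i < mm then some (v i) else some mm))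
      (t, s, some m)
      = (t + (l.map u).sum, s + (l.map v).sum,
          some (l.foldl (fun acc i => min acc (v i)) m)) := by
  induction l generalizing t s m with
  | nil => simp
  | cons y tl ih =>
      simp only [List.foldl_cons, List.map_cons, List.sum_cons]
      have h : (if v y < m then some (v y) else some m) = some (min m (v y)) := by
        split <;> exact congrArg some (by omega)
      rw [h, ih]
      refine Prod.ext (by push_cast; ring) (Prod.ext (by push_cast; ring) rfl)

lemma pv_map_shift (f : Int → Int → Int) (a : Int) (As B : List Int)
    (hB : As.length + 1 ≤ B.length) :
    (PySem.List.pyRange 1 ((As.length : Int) + 1) 1).map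
        (fun i => f (PySem.List.pyGetD (a :: As) i 0) (PySem.List.pyGetD B (i - 1) 0))
      = (As.zip (B.take As.length)).map (fun p => f p.1 p.2) := by
  apply List.ext_getElem
  · simp [PySem.List.length_pyRange_one, List.length_zip]
    omega
  · intro k h1 h2
    simp only [List.getElem_map, PySem.List.getElem_pyRange_one, List.getElem_zip,
      List.getElem_take]
    have hk : k < As.length := by
      simpa [PySem.List.length_pyRange_one] using h1
    have e1 : (1 : Int) + (k : Int) = ((k + 1 : Nat) : Int) := by push_cast; ring
    have e2 : ((k + 1 : Nat) : Int) - 1 = ((k : Nat) : Int) := by push_cast; ring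
    rw [e1, e2, PySem.List.pyGetD_natCast, PySem.List.pyGetD_natCast]
    rw [List.getD_cons_succ, List.getD_eq_getElem As 0 hk,
      List.getD_eq_getElem B 0 (by omega)]

lemma pv_sum_split (l : List (Int × Int)) :
    (l.map (fun p => max 0 (p.1 - p.2))).sum + (l.map (fun p => min p.1 p.2)).sum
      = (l.map (fun p => p.1)).sum := by
  induction l with
  | nil => simp
  | cons p t ih =>
      simp only [List.map_cons, List.sum_cons]
      omega

lemma solveA_eq (a : Int) (As B : List Int) (hB : As.length + 1 ≤ B.length) :
    solve (a :: As) B = PySem.Int.mod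
      ((max 0 (a - B.getD As.length 0) +
          ((As.zip (B.take As.length)).map (fun p => max 0 (p.1 - p.2))).sum)
        + List.foldl min (min a (B.getD As.length 0))
            ((As.zip (B.take As.length)).map (fun p => min p.1 p.2)))
      1000000007 := by
  have hn : ((a :: As).length : Int) = (As.length : Int) + 1 := by
    push_cast [List.length_cons]; ring
  have hone : ((As.length : Int) + 1) - 1 = ((As.length : Nat) : Int) := by ring
  have hbl : PySem.List.pyGetD B ((As.length : Int) + 1 - 1) 0 = B.getD As.length 0 := by
    rw [hone, PySem.List.pyGetD_natCast]
  have hrange : PySem.List.pyRange 0 ((As.length : Int) + 1) 1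
      = 0 :: PySem.List.pyRange 1 ((As.length : Int) + 1) 1 :=
    PySem.List.pyRange_one_cons (by omega)
  simp only [solve, hn, hrange, List.foldl_cons, if_true, hbl,
    PySem.List.pyGetD_zero_cons, zero_add]
  have hdam : List.foldl
      (fun d i =>
        if i = 0 then d + max 0 (PySem.List.pyGetD (a :: As) i 0 - B.getD As.length 0)
        else d + max 0 (PySem.List.pyGetD (a :: As) i 0 - PySem.List.pyGetD B (i - 1) 0))
      (max 0 (a - B.getD As.length 0)) (PySem.List.pyRange 1 ((As.length : Int) + 1))
      = max 0 (a - B.getD As.length 0) +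
        ((As.zip (B.take As.length)).map (fun p => max 0 (p.1 - p.2))).sum := by
    refine Eq.trans (PySem.List.foldl_congr_mem _ _
      (fun d i => d + max 0 (PySem.List.pyGetD (a :: As) i 0 - PySem.List.pyGetD B (i - 1) 0))
      _ ?_) ?_
    · intro acc i hi
      have h1 : (1 : Int) ≤ i := (PySem.List.mem_pyRange_one.mp hi).1
      rw [if_neg (by omega)]
    · rw [PySem.List.foldl_add]
      rw [pv_map_shift (fun x y => max 0 (x - y)) a As B hB]
  rw [hdam]
  set D : Int := max 0 (a - B.getD As.length 0) +
    (List.map (fun p => max 0 (p.1 - p.2)) (As.zip (List.take As.length B))).sum with hD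
  rw [pv_optfold (fun i =>
    if i = 0 then
      PySem.List.pyGetD (a :: As) i 0 + D - max 0 (PySem.List.pyGetD (a :: As) i 0 - B.getD As.length 0)
    else
      PySem.List.pyGetD (a :: As) i 0 + D - max 0 (PySem.List.pyGetD (a :: As) i 0 - PySem.List.pyGetD B (i - 1) 0))]
  have hstart : a + D - max 0 (a - B.getD As.length 0) = D + min a (B.getD As.length 0) := by omega
  rw [hstart]
  show PySem.Int.mod _ 1000000007 = _
  congr 1
  refine Eq.trans (PySem.List.foldl_congr_mem _ _
    (fun acc i => min acc (D + min (PySem.List.pyGetD (a :: As) i 0) (PySem.List.pyGetD B (i - 1) 0)))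
    _ ?_) ?_
  · intro acc i hi
    have h1 : (1 : Int) ≤ i := (PySem.List.mem_pyRange_one.mp hi).1
    rw [if_neg (by omega)]
    beta_reduce
    omega
  · rw [pv_dist_min D (fun i => min (PySem.List.pyGetD (a :: As) i 0) (PySem.List.pyGetD B (i - 1) 0))]
    congr 1
    rw [← List.foldl_map (f := fun i => min (PySem.List.pyGetD (a :: As) i 0) (PySem.List.pyGetD B (i - 1) 0)) (g := min)]
    rw [pv_map_shift (fun x y => min x y) a As B hB]

lemma solveB_eq (a : Int) (As B : List Int) (hB : As.length + 1 ≤ B.length) :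
    solve_alt (a :: As) B = PySem.Int.mod
      ((a + As.sum)
        - (min a (B.getD As.length 0) +
            ((As.zip (B.take As.length)).map (fun p => min p.1 p.2)).sum)
        + List.foldl min (min a (B.getD As.length 0))
            ((As.zip (B.take As.length)).map (fun p => min p.1 p.2)))
      (10 ^ 9 + 7) := by
  have hn : ((a :: As).length : Int) = (As.length : Int) + 1 := by
    push_cast [List.length_cons]; ring
  have hone : ((As.length : Int) + 1) - 1 = ((As.length : Nat) : Int) := by ring
  have hbl : PySem.List.pyGetD B ((As.length : Int) + 1 - 1) 0 = B.getD As.length 0 := by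
    rw [hone, PySem.List.pyGetD_natCast]
  have hrange : PySem.List.pyRange 0 ((As.length : Int) + 1) 1
      = 0 :: PySem.List.pyRange 1 ((As.length : Int) + 1) 1 :=
    PySem.List.pyRange_one_cons (by omega)
  simp only [solve_alt, hn, hrange, List.foldl_cons, if_true, hbl,
    PySem.List.pyGetD_zero_cons, zero_add, pv_if_min]
  have hcongr : List.foldl
      (fun (st : Int × Int × Option Int) i =>
        (st.1 + PySem.List.pyGetD (a :: As) i 0,
          st.2.1 + min (PySem.List.pyGetD (a :: As) i 0)
            (if i = 0 then B.getD As.length 0 else PySem.List.pyGetD B (i - 1) 0),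
          match st.2.2 with
          | none => some (min (PySem.List.pyGetD (a :: As) i 0)
              (if i = 0 then B.getD As.length 0 else PySem.List.pyGetD B (i - 1) 0))
          | some m =>
              if min (PySem.List.pyGetD (a :: As) i 0)
                  (if i = 0 then B.getD As.length 0 else PySem.List.pyGetD B (i - 1) 0) < m
              then some (min (PySem.List.pyGetD (a :: As) i 0)
                  (if i = 0 then B.getD As.length 0 else PySem.List.pyGetD B (i - 1) 0))
              else some m))
      (a, min a (B.getD As.length 0), some (min a (B.getD As.length 0)))
      (PySem.List.pyRange 1 ((As.length : Int) + 1))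
      = (a + As.sum,
         min a (B.getD As.length 0) +
           ((As.zip (B.take As.length)).map (fun p => min p.1 p.2)).sum,
         some (List.foldl min (min a (B.getD As.length 0))
           ((As.zip (B.take As.length)).map (fun p => min p.1 p.2)))) := by
    refine Eq.trans (PySem.List.foldl_congr_mem _ _
      (fun (st : Int × Int × Option Int) i =>
        (st.1 + PySem.List.pyGetD (a :: As) i 0,
         st.2.1 + min (PySem.List.pyGetD (a :: As) i 0) (PySem.List.pyGetD B (i - 1) 0),
         match st.2.2 with
         | none => some (min (PySem.List.pyGetD (a :: As) i 0) (PySem.List.pyGetD B (i - 1) 0))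
         | some mm =>
             if min (PySem.List.pyGetD (a :: As) i 0) (PySem.List.pyGetD B (i - 1) 0) < mm
             then some (min (PySem.List.pyGetD (a :: As) i 0) (PySem.List.pyGetD B (i - 1) 0))
             else some mm))
      _ ?_) ?_
    · intro acc i hi
      have h1 : (1 : Int) ≤ i := (PySem.List.mem_pyRange_one.mp hi).1
      simp only [if_neg (show ¬ i = 0 by omega)]
    · rw [pv_trip (fun i => PySem.List.pyGetD (a :: As) i 0)
        (fun i => min (PySem.List.pyGetD (a :: As) i 0) (PySem.List.pyGetD B (i - 1) 0))]
      rw [pv_map_shift (fun x _ => x) a As B hB,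
        pv_map_shift (fun x y => min x y) a As B hB]
      rw [← List.foldl_map (f := fun i => min (PySem.List.pyGetD (a :: As) i 0) (PySem.List.pyGetD B (i - 1) 0)) (g := min)]
      rw [pv_map_shift (fun x y => min x y) a As B hB]
      have hfst : ((As.zip (B.take As.length)).map (fun p => p.1)).sum = As.sum := by
        have h := List.map_fst_zip (l₁ := As) (l₂ := B.take As.length)
          (by simp [List.length_take]; omega)
        simpa using congrArg List.sum h
      rw [hfst]
  rw [hcongr]

-- ===== VERDICT (by name: the statement is the Claim_ definition above) =====
theorem solve_spec : Claim_equal_solve := by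
  unfold Claim_equal_solve
  intro A B _ hpre
  obtain ⟨hne, hlen⟩ := hpre
  cases A with
  | nil => exact absurd rfl hne
  | cons a As =>
    have hB : As.length + 1 ≤ B.length := by simpa using hlen
    unfold Spec_solve
    rw [solveA_eq a As B hB, solveB_eq a As B hB]
    have hsum := pv_sum_split (As.zip (B.take As.length))
    have hfst : ((As.zip (B.take As.length)).map (fun p => p.1)).sum = As.sum := by
      have h := List.map_fst_zip (l₁ := As) (l₂ := B.take As.length)
        (by simp [List.length_take]; omega)
      simpa using congrArg List.sum h
    have h7 : (10 : Int) ^ 9 + 7 = 1000000007 := by norm_num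
    rw [h7]
    congr 1
    omega
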